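-- pv_equiv track=rewrite | github.com/peernagy/lob_bench | lobcast_src/lobcast_override.py | merge_valid_indices
-- ===== SOURCE A (Python) =====
-- def merge_valid_indices(indices_list: list[list[int]], offset: int) -> list[int]:
--     """
--     Merge multiple lists of valid window indices with a single offset applied cumulatively.
--
--     Args:
--         indices_list: List of valid indices arrays
--         offset: Scalar offset (window size) applied cumulatively between each list
--
--     Returns:
--         Merged list of valid indices
--     """
--     merged = []
--     current_offset = 0
--
--     for indices in indices_list:
--         merged.extend([idx + current_offset for idx in indices])
--         if indices:  # Only add offset if list is not empty
--             current_offset = indices[-1] + current_offset + offset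
--
--     return sorted(merged)
-- ===== SOURCE B (Python) =====
-- def merge_valid_indices(indices_list: list[list[int]], offset: int) -> list[int]:
--     # Recursive decomposition: each call shifts its head sublist by the current
--     # offset and recurses on the tail with the updated offset, concatenating
--     # the results; no mutable accumulator list is threaded through a loop.
--     def go(lists, cur):
--         if not lists:
--             return []
--         head = lists[0]
--         shifted = [i + cur for i in head]
--         nxt = head[-1] + cur + offset if head else cur
--         return shifted + go(lists[1:], nxt)
--     return sorted(go(indices_list, 0))
-- ===== Notes on version B (the rewrite author's own statement) =====
-- stated objective: alternative
-- what changed: Replaces A's imperative loop that extends a mutable merged list while threading a running offset with a recursive decomposition: a helper recurses over the list of sublists, shifting the head and concatenating with the recursive result for the tail, then sorts once.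
import Mathlib
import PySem

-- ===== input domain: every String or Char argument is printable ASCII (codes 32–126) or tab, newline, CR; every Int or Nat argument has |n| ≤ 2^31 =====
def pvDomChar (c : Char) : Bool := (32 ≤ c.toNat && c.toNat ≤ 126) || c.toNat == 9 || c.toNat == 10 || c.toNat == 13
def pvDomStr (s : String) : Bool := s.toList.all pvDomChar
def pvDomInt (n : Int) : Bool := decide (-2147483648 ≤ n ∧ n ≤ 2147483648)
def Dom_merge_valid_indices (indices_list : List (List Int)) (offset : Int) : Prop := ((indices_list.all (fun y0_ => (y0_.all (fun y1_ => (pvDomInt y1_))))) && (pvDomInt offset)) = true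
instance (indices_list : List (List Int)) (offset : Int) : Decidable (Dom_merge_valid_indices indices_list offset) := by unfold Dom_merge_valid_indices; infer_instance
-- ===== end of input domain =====

-- ===== PORT A =====
-- B replaces A's imperative running-offset accumulation loop with a recursive helper
-- that shifts the head sublist and concatenates the recursion on the tail (alternative decomposition, same cost).
def merge_valid_indices (indices_list : List (List Int)) (offset : Int) : List Int :=
  -- merged/current_offset threaded through the loop as a pair; indices[-1] via pyGet? (-1)
  let st := indices_list.foldl (fun (st : List Int × Int) indices =>
      (st.1 ++ indices.map (fun idx => idx + st.2),
       if indices.isEmpty then st.2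
       else (PySem.List.pyGet? indices (-1)).getD 0 + st.2 + offset))
    ([], 0)
  PySem.List.sorted st.1 (fun x => x) false

-- ===== PORT B =====
-- recursive helper go(lists, cur) from Source B
def pvGo (offset : Int) : List (List Int) → Int → List Int
  | [], _ => []
  | head :: rest, cur =>
      head.map (fun i => i + cur) ++
        pvGo offset rest
          (if head.isEmpty then cur else (PySem.List.pyGet? head (-1)).getD 0 + cur + offset)

def merge_valid_indices_alt (indices_list : List (List Int)) (offset : Int) : List Int :=
  PySem.List.sorted (pvGo offset indices_list 0) (fun x => x) false

-- ===== PRECONDITION & SPEC =====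
def Spec_merge_valid_indices (indices_list : List (List Int)) (offset : Int) (out : List Int) : Prop := out = merge_valid_indices_alt indices_list offset
instance (indices_list : List (List Int)) (offset : Int) (out : List Int) : Decidable (Spec_merge_valid_indices indices_list offset out) := by unfold Spec_merge_valid_indices; infer_instance

-- ===== CLAIM (what is proved, stated in full; the proofs are below) =====
def Claim_equal_merge_valid_indices : Prop := ∀ (indices_list : List (List Int)) (offset : Int), Dom_merge_valid_indices indices_list offset → Spec_merge_valid_indices indices_list offset (merge_valid_indices indices_list offset)

-- ===== LEMMAS AND PROOFS =====

theorem pvA_fold (offset : Int) :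
    ∀ (l : List (List Int)) (acc : List Int) (t : Int),
      (l.foldl (fun (st : List Int × Int) indices =>
          (st.1 ++ indices.map (fun idx => idx + st.2),
           if indices.isEmpty then st.2
           else (PySem.List.pyGet? indices (-1)).getD 0 + st.2 + offset))
        (acc, t)).1 = acc ++ pvGo offset l t := by
  intro l
  induction l with
  | nil => intro acc t; simp [pvGo]
  | cons s r ih =>
      intro acc t
      simp only [List.foldl_cons, pvGo]
      rw [ih]
      split_ifs <;> simp

-- ===== VERDICT (by name: the statement is the Claim_ definition above) =====
theorem merge_valid_indices_spec : Claim_equal_merge_valid_indices := by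
  intro l offset _
  unfold Spec_merge_valid_indices merge_valid_indices merge_valid_indices_alt
  simp only [pvA_fold, List.nil_append]
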